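-- pv_equiv track=rewrite | github.com/ElderY/staticNLM | StaticNLM/StaticNLM/Unigrams/word_frequency.py | freqcounter
-- ===== SOURCE A (Python) =====
-- import string
--
-- def freqcounter(text):
--     word_freq = {}
--     textsplit = text.lower().split()
--     textdotfilter = ["<START>"]
--     words = []
--
--
--     for w in textsplit:
--         if "." in w[-1]:
--             textdotfilter.append(w[:-1])
--             textdotfilter.append("<END>")
--             textdotfilter.append("<START>")
--         else:
--             textdotfilter.append(w)
--
--     for w in textdotfilter:
--         if w == "<START>" or w == "<END>":
--             words.append(w)
--         else:
--             words.append(w.strip(string.punctuation))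
--
--
--
--     for w in words:
--         word_freq[w] = word_freq.get(w, 0) + 1
--     # word_freq_tuples = sorted(list(word_freq.items()), key= lambda x: (-x[1], x[0]))
--
--     return word_freq
-- ===== SOURCE B (Python) =====
-- import string
--
--
-- def _bump(d, w):
--     d[w] = d.get(w, 0) + 1
--
--
-- def freqcounter(text):
--     word_freq = {"<START>": 1}
--     for w in text.lower().split():
--         if w[-1] == ".":
--             _bump(word_freq, w[:-1].strip(string.punctuation))
--             _bump(word_freq, "<END>")
--             _bump(word_freq, "<START>")
--         else:
--             _bump(word_freq, w.strip(string.punctuation))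
--     return word_freq
-- ===== Notes on version B (the rewrite author's own statement) =====
-- stated objective: simpler
-- what changed: Fuses A's three passes (build a boundary-token list, strip punctuation into a second list, then count) into one streaming loop over text.lower().split() that increments dict counts directly, never materialising the intermediate lists.
import Mathlib
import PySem

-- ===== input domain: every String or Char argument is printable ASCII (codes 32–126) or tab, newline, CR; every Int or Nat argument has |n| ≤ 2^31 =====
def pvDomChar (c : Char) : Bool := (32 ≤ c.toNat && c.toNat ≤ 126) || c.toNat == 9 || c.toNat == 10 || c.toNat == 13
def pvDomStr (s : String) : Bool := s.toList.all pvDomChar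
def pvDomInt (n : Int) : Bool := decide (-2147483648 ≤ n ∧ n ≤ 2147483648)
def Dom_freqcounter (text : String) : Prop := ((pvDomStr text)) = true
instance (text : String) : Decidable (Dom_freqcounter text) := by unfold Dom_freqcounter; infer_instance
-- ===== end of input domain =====

-- B fuses A's three list-building passes into one streaming count over the split words (objective: simpler).

-- ===== PORT A =====
-- string.punctuation
def pvPunct : String := "!\"#$%&'()*+,-./:;<=>?@[\\]^_`{|}~"

def freqcounter (text : String) : List (String × Int) :=
  let textsplit := PySem.Str.split₀ (PySem.Str.lower text)
  let textdotfilter := textsplit.foldl (fun acc w =>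
    match PySem.List.pyGet? w.toList (-1) with   -- w[-1]; none = IndexError, unreachable: split() words are nonempty
    | some c =>
        if PySem.Chars.isIn ['.'] [c] then       -- "." in w[-1]
          acc ++ [String.ofList (PySem.List.slice w.toList none (some (-1)))] ++ ["<END>"] ++ ["<START>"]
        else acc ++ [w]
    | none => acc ++ [w]) ["<START>"]
  let words := textdotfilter.foldl (fun acc w =>
    if w = "<START>" ∨ w = "<END>" then acc ++ [w]
    else acc ++ [PySem.Str.stripChars w pvPunct]) []
  (words.foldl (fun d w => d.insert w (d.getD w 0 + 1)) PySem.Dict.empty).items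

-- ===== PORT B =====
def pvBump (d : PySem.Dict String Int) (w : String) : PySem.Dict String Int :=
  d.insert w (d.getD w 0 + 1)

def freqcounter_alt (text : String) : List (String × Int) :=
  ((PySem.Str.split₀ (PySem.Str.lower text)).foldl (fun d w =>
      if PySem.List.pyGet? w.toList (-1) = some '.' then    -- w[-1] == "."
        pvBump (pvBump (pvBump d
          (PySem.Str.stripChars (String.ofList (PySem.List.slice w.toList none (some (-1)))) pvPunct))
          "<END>") "<START>"
      else
        pvBump d (PySem.Str.stripChars w pvPunct))
    (PySem.Dict.empty.insert "<START>" 1)).items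

-- ===== PRECONDITION & SPEC =====
def Spec_freqcounter (text : String) (out : List (String × Int)) : Prop := out = freqcounter_alt text
instance (text : String) (out : List (String × Int)) : Decidable (Spec_freqcounter text out) := by unfold Spec_freqcounter; infer_instance

-- ===== CLAIM (what is proved, stated in full; the proofs are below) =====
def Claim_equal_freqcounter : Prop := ∀ (text : String), Dom_freqcounter text → Spec_freqcounter text (freqcounter text)

-- ===== LEMMAS AND PROOFS =====

-- the per-word expansion A's first loop appends
def pvGA (w : String) : List String :=
  match PySem.List.pyGet? w.toList (-1) with
  | some c =>
      if PySem.Chars.isIn ['.'] [c] then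
        [String.ofList (PySem.List.slice w.toList none (some (-1))), "<END>", "<START>"]
      else [w]
  | none => [w]

-- the per-word rewrite A's second loop applies
def pvH (w : String) : String :=
  if w = "<START>" ∨ w = "<END>" then w else PySem.Str.stripChars w pvPunct

-- a word containing neither 'S' nor 'E' (true of every word of a lowered text)
def pvNoCap (w : String) : Prop := 'S' ∉ w.toList ∧ 'E' ∉ w.toList

theorem pvUpperBounds (a : Char) (h : PySem.Chars.isupper a = true) :
    65 ≤ a.toNat ∧ a.toNat ≤ 90 := by
  unfold PySem.Chars.isupper at h
  simp only [Bool.and_eq_true, decide_eq_true_eq, Char.le_def, UInt32.le_iff_toNat_le] at h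
  exact h

theorem pvLowerChar_ne (a : Char) : PySem.Chars.lowerChar a ≠ 'S' ∧ PySem.Chars.lowerChar a ≠ 'E' := by
  unfold PySem.Chars.lowerChar
  by_cases h : PySem.Chars.isupper a = true
  · obtain ⟨h1, h2⟩ := pvUpperBounds a h
    simp only [h, if_true]
    have hv : (a.toNat + 32).isValidChar := Or.inl (by omega)
    constructor <;> intro he <;>
    · have h3 := congrArg Char.toNat he
      rw [Char.toNat_ofNat, if_pos hv] at h3
      first
        | (rw [show ('S').toNat = 83 from rfl] at h3; omega)
        | (rw [show ('E').toNat = 69 from rfl] at h3; omega)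
  · simp only [h, if_false]
    constructor <;> rintro rfl <;> revert h <;> decide

theorem pvSplit_go_mem (s : List Char) : ∀ (cur : List Char) (acc : List (List Char)) (w : List Char),
    w ∈ PySem.Chars.split₀.go s cur acc → w ∈ acc ∨ ∀ c ∈ w, c ∈ s ∨ c ∈ cur := by
  induction s with
  | nil =>
    intro cur acc w hw
    rw [PySem.Chars.split₀.go] at hw
    by_cases hc : cur.isEmpty = true
    · simp [hc] at hw; exact Or.inl hw
    · simp [hc] at hw
      rcases hw with h | h
      · exact Or.inl h
      · subst h; exact Or.inr fun c hcm => Or.inr (by simpa using hcm)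
  | cons a rest ih =>
    intro cur acc w hw
    rw [PySem.Chars.split₀.go] at hw
    by_cases hs : PySem.Chars.isspace a = true
    · simp only [hs, if_true] at hw
      by_cases hc : cur.isEmpty = true
      · simp only [hc, if_true] at hw
        rcases ih [] acc w hw with h | h
        · exact Or.inl h
        · refine Or.inr fun c hcm => ?_
          rcases h c hcm with h1 | h1
          · exact Or.inl (List.mem_cons_of_mem _ h1)
          · simp at h1
      · simp only [hc] at hw
        rcases ih [] (cur.reverse :: acc) w hw with h | h
        · rcases List.mem_cons.mp h with h1 | h1
          · subst h1; exact Or.inr fun c hcm => Or.inr (by simpa using hcm)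
          · exact Or.inl h1
        · refine Or.inr fun c hcm => ?_
          rcases h c hcm with h1 | h1
          · exact Or.inl (List.mem_cons_of_mem _ h1)
          · simp at h1
    · simp only [hs] at hw
      rcases ih (a :: cur) acc w hw with h | h
      · exact Or.inl h
      · refine Or.inr fun c hcm => ?_
        rcases h c hcm with h1 | h1
        · exact Or.inl (List.mem_cons_of_mem _ h1)
        · rcases List.mem_cons.mp h1 with h2 | h2
          · subst h2; exact Or.inl List.mem_cons_self
          · exact Or.inr h2

theorem pvNoCap_of_mem_lower (text : String) (w : String)
    (hsub : ∀ c ∈ w.toList, c ∈ (PySem.Str.lower text).toList) : pvNoCap w := by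
  constructor <;> intro hc <;>
  · have h1 := hsub _ hc
    rw [PySem.Str.toList_lower] at h1
    unfold PySem.Chars.lower at h1
    rcases List.mem_map.mp h1 with ⟨a, _, ha⟩
    first
      | exact (pvLowerChar_ne a).1 ha
      | exact (pvLowerChar_ne a).2 ha

theorem pvNoCap_of_mem_split (text : String) (w : String)
    (hw : w ∈ PySem.Str.split₀ (PySem.Str.lower text)) : pvNoCap w := by
  apply pvNoCap_of_mem_lower text
  intro c hc
  have h1 : w.toList ∈ PySem.Chars.split₀ (PySem.Str.lower text).toList := by
    rw [← PySem.Str.split₀_map_toList]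
    exact List.mem_map_of_mem hw
  rcases pvSplit_go_mem _ [] [] w.toList h1 with h | h
  · simp at h
  · rcases h c hc with h2 | h2
    · exact h2
    · simp at h2

theorem pvSlice_subset {α : Type} (xs : List α) (a b : Option Int) :
    PySem.List.slice xs a b ⊆ xs := by
  intro x hx
  unfold PySem.List.slice at hx
  simp only at hx
  exact List.mem_of_mem_drop (List.mem_of_mem_take hx)

theorem pvNoCap_slice (w : String) (h : pvNoCap w) :
    pvNoCap (String.ofList (PySem.List.slice w.toList none (some (-1)))) := by
  constructor <;> intro hc <;> rw [String.toList_ofList] at hc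
  · exact h.1 (pvSlice_subset _ _ _ hc)
  · exact h.2 (pvSlice_subset _ _ _ hc)

theorem pvNoCap_ne (w : String) (h : pvNoCap w) : w ≠ "<START>" ∧ w ≠ "<END>" := by
  constructor <;> rintro rfl
  · exact h.1 (by decide)
  · exact h.2 (by decide)

theorem pvH_of_noCap (w : String) (h : pvNoCap w) : pvH w = PySem.Str.stripChars w pvPunct := by
  obtain ⟨h1, h2⟩ := pvNoCap_ne w h
  simp [pvH, h1, h2]

theorem pvIsIn_dot (c : Char) : PySem.Chars.isIn ['.'] [c] = true ↔ c = '.' := by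
  rw [PySem.Chars.isIn_iff_infix]
  constructor
  · rintro ⟨s, t, h⟩
    have hm : ('.' : Char) ∈ s ++ ['.'] ++ t := by simp
    rw [h] at hm
    simp at hm
    exact hm.symm
  · rintro rfl; exact ⟨[], [], rfl⟩

theorem pvFused (ts : List String) (hts : ∀ w ∈ ts, pvNoCap w) (d : PySem.Dict String Int) :
    ((ts.flatMap pvGA).map pvH).foldl (fun d w => d.insert w (d.getD w 0 + 1)) d =
      ts.foldl (fun d w =>
        if PySem.List.pyGet? w.toList (-1) = some '.' then
          pvBump (pvBump (pvBump d
            (PySem.Str.stripChars (String.ofList (PySem.List.slice w.toList none (some (-1)))) pvPunct))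
            "<END>") "<START>"
        else pvBump d (PySem.Str.stripChars w pvPunct)) d := by
  induction ts generalizing d with
  | nil => rfl
  | cons w ts ih =>
    have hw : pvNoCap w := hts w List.mem_cons_self
    rw [List.flatMap_cons, List.map_append, List.foldl_append, List.foldl_cons]
    rw [ih (fun x hx => hts x (List.mem_cons_of_mem _ hx))]
    congr 1
    unfold pvGA
    cases hg : PySem.List.pyGet? w.toList (-1) with
    | none =>
      simp only [hg, List.map_cons, List.map_nil, List.foldl_cons, List.foldl_nil]
      rw [pvH_of_noCap w hw]
      simp [pvBump]
    | some c =>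
      by_cases hdot : PySem.Chars.isIn ['.'] [c] = true
      · have hc : c = '.' := (pvIsIn_dot c).mp hdot
        subst hc
        simp only [hg, hdot, if_true, List.map_cons, List.map_nil, List.foldl_cons, List.foldl_nil]
        rw [pvH_of_noCap _ (pvNoCap_slice w hw)]
        simp [pvH, pvBump]
      · have hc : c ≠ '.' := fun h => hdot ((pvIsIn_dot c).mpr h)
        have hdot' : PySem.Chars.isIn ['.'] [c] = false := by simpa using hdot
        simp only [hg, hdot', Bool.false_eq_true, if_false, List.map_cons, List.map_nil,
          List.foldl_cons, List.foldl_nil]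
        rw [pvH_of_noCap w hw]
        simp [pvBump, hc]

-- ===== VERDICT (by name: the statement is the Claim_ definition above) =====
theorem freqcounter_spec : Claim_equal_freqcounter := by
  intro text _
  unfold Spec_freqcounter freqcounter freqcounter_alt
  have e1 : (fun (acc : List String) (w : String) =>
      match PySem.List.pyGet? w.toList (-1) with
      | some c =>
          if PySem.Chars.isIn ['.'] [c] then
            acc ++ [String.ofList (PySem.List.slice w.toList none (some (-1)))] ++ ["<END>"] ++ ["<START>"]
          else acc ++ [w]
      | none => acc ++ [w]) = (fun acc w => acc ++ pvGA w) := by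
    funext acc w
    unfold pvGA
    cases PySem.List.pyGet? w.toList (-1) with
    | none => simp
    | some c =>
      dsimp only
      split_ifs <;> simp
  have e2 : (fun (acc : List String) (w : String) =>
      if w = "<START>" ∨ w = "<END>" then acc ++ [w]
      else acc ++ [PySem.Str.stripChars w pvPunct]) = (fun acc w => acc ++ [pvH w]) := by
    funext acc w
    unfold pvH
    split_ifs <;> rfl
  simp only [e1, e2, PySem.List.foldl_append_eq_flatMap]
  set ts := PySem.Str.split₀ (PySem.Str.lower text) with hts
  have e3 : List.flatMap (fun w => [pvH w]) (["<START>"] ++ ts.flatMap pvGA)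
      = "<START>" :: (ts.flatMap pvGA).map pvH := by
    have hm : ∀ (l : List String), List.flatMap (fun w => [pvH w]) l = List.map pvH l :=
      fun l => (List.map_eq_flatMap (f := pvH) (l := l)).symm
    rw [List.flatMap_append, hm, hm]
    simp [pvH]
  rw [List.nil_append, e3, List.foldl_cons]
  have e4 : (PySem.Dict.empty : PySem.Dict String Int).insert "<START>"
      ((PySem.Dict.empty : PySem.Dict String Int).getD "<START>" 0 + 1)
      = (PySem.Dict.empty : PySem.Dict String Int).insert "<START>" 1 := by decide
  rw [e4, pvFused ts (fun w hw => pvNoCap_of_mem_split text w hw)]
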